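-- pv_equiv track=rewrite | github.com/wheaties/us-geographies | usgeo/parsers/pdf.py | _index_empty_columns
-- ===== SOURCE A (Python) =====
-- def _index_empty_columns(tables):
--     columns = len(tables[0][0])
--     matrix = {}
--     for idx in range(columns):
--         matrix[idx] = False
--         for table in tables:
--             matrix[idx] |= any(row[idx] for row in table)
--     return [idx for idx in range(columns) if not matrix[idx]]
-- ===== SOURCE B (Python) =====
-- def _index_empty_columns(tables):
--     candidates = list(range(len(tables[0][0])))
--     for table in tables:
--         for row in table:
--             candidates = [idx for idx in candidates if not row[idx]]
--             if not candidates: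
--                 return candidates
--     return candidates
-- ===== Notes on version B (the rewrite author's own statement) =====
-- stated objective: alternative
-- what changed: Replaces A's dict of idx->bool built column-major (re-scanning every table per column with any()) by a sieve: a shrinking list of still-empty candidate columns is pruned row by row and the function returns early as soon as no candidate survives; the surviving list is the answer directly, with no final comprehension over range(columns).
import Mathlib
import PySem

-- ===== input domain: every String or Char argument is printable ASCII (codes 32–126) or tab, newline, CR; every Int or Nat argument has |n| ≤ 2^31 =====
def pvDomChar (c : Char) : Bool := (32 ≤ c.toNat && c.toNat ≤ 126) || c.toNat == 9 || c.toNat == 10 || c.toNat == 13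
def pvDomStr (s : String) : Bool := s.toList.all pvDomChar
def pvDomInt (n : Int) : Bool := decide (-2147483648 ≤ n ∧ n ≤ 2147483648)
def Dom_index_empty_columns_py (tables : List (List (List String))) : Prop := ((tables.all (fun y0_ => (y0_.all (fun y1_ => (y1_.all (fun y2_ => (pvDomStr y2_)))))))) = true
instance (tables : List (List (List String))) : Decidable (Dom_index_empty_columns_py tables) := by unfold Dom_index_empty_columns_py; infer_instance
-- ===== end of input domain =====

-- B replaces A's dict of idx->bool built by re-scanning every table per column with a
-- sieve: a shrinking list of still-empty candidate columns pruned row by row, with an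
-- early return as soon as no candidate survives (alternative decomposition).

-- ===== PORT A =====
-- column-major: for each idx, OR over tables of any(row[idx]); dict idx -> Bool
def index_empty_columns_py (tables : List (List (List String))) : List Int :=
  let columns := ((tables.headD []).headD []).length
  let matrix : PySem.Dict Int Bool :=
    (List.range columns).foldl (fun m (idx : Nat) =>
      tables.foldl (fun m table =>
        m.insert (Int.ofNat idx)
          (m.getD (Int.ofNat idx) false || table.any (fun row => row.getD idx "" != "")))
        (m.insert (Int.ofNat idx) false))
      PySem.Dict.empty
  (List.range columns).filterMap (fun (idx : Nat) =>
    if matrix.getD (Int.ofNat idx) false then none else some (Int.ofNat idx))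

-- ===== PORT B =====
-- inner row loop of B: prune candidates by each row; none = the early 'return candidates'
-- taken when the pruned list becomes empty (the returned value is that empty list)
def pruneRowsE : List Nat → List (List String) → Option (List Nat)
  | cands, [] => some cands
  | cands, row :: rest =>
      let c := cands.filter (fun idx => row.getD idx "" == "")
      if c.isEmpty then none else pruneRowsE c rest

-- outer table loop of B; an early return yields the empty candidate list
def pruneTables : List Nat → List (List (List String)) → List Nat
  | cands, [] => cands
  | cands, t :: rest =>
      match pruneRowsE cands t with
      | none => []
      | some c => pruneTables c rest

def index_empty_columns_py_alt (tables : List (List (List String))) : List Int :=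
  (pruneTables (List.range ((tables.headD []).headD []).length) tables).map Int.ofNat

-- ===== PRECONDITION & SPEC =====
-- Pre_ is exactly the inputs on which Python A returns: it excludes the empty tables
-- list, an empty first table, and ragged inputs where A's any() reaches a row shorter
-- than column j before seeing a non-empty cell at j (IndexError).
def Pre_index_empty_columns_py (tables : List (List (List String))) : Prop :=
  tables ≠ [] ∧ tables.headD [] ≠ [] ∧
  ∀ t ∈ tables, ∀ j < ((tables.headD []).headD []).length, ∀ k < t.length,
    (∀ i < k, (t.getD i []).getD j "" = "") → j < (t.getD k []).length
instance (tables : List (List (List String))) : Decidable (Pre_index_empty_columns_py tables) := by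
  unfold Pre_index_empty_columns_py; infer_instance

def pvWitness_index_empty_columns_py : List (List (List String)) := [[["a", ""], ["", ""]]]

def Spec_index_empty_columns_py (tables : List (List (List String))) (out : List Int) : Prop := out = index_empty_columns_py_alt tables
instance (tables : List (List (List String))) (out : List Int) : Decidable (Spec_index_empty_columns_py tables out) := by unfold Spec_index_empty_columns_py; infer_instance

-- ===== CLAIM (what is proved, stated in full; the proofs are below) =====
def Claim_equal_index_empty_columns_py : Prop := ∀ (tables : List (List (List String))), Dom_index_empty_columns_py tables → Pre_index_empty_columns_py tables → Spec_index_empty_columns_py tables (index_empty_columns_py tables)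

-- ===== LEMMAS AND PROOFS =====

-- column idx is non-empty in some table
def colNonEmpty (tables : List (List (List String))) (idx : Nat) : Bool :=
  tables.any (fun t => t.any (fun row => row.getD idx "" != ""))

-- A side, inner loop over tables for a fixed key k: getD at any key k'
lemma dictA_inner (k : Int) (g : List (List String) → Bool) :
    ∀ (ts : List (List (List String))) (m : PySem.Dict Int Bool) (k' : Int),
      (ts.foldl (fun m table => m.insert k (m.getD k false || g table)) m).getD k' false
        = if k' = k then m.getD k false || ts.any g else m.getD k' false := by
  intro ts
  induction ts with
  | nil => intro m k'; by_cases h : k' = k <;> simp [h]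
  | cons t rest ih =>
      intro m k'
      rw [List.foldl_cons, ih]
      by_cases h : k' = k
      · subst h
        rw [if_pos rfl, if_pos rfl, PySem.Dict.getD_insert_self, List.any_cons, Bool.or_assoc]
      · rw [if_neg h, if_neg h, PySem.Dict.getD_insert, if_neg h]

-- A side, outer loop over the index list
lemma dictA_outer (tables : List (List (List String))) :
    ∀ (l : List Nat) (m : PySem.Dict Int Bool) (j : Nat),
      (l.foldl (fun m (idx : Nat) =>
          tables.foldl (fun m table =>
            m.insert (Int.ofNat idx)
              (m.getD (Int.ofNat idx) false || table.any (fun row => row.getD idx "" != "")))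
            (m.insert (Int.ofNat idx) false)) m).getD (Int.ofNat j) false
        = if j ∈ l then colNonEmpty tables j else m.getD (Int.ofNat j) false := by
  intro l
  induction l with
  | nil => intro m j; simp
  | cons i rest ih =>
      intro m j
      rw [List.foldl_cons, ih]
      have hstep := dictA_inner (Int.ofNat i)
        (fun table => table.any (fun row => row.getD i "" != ""))
        tables (m.insert (Int.ofNat i) false) (Int.ofNat j)
      by_cases hj : j ∈ rest
      · simp [hj]
      · rw [if_neg hj, hstep]
        by_cases hji : j = i
        · subst hji
          rw [if_pos rfl, PySem.Dict.getD_insert_self, if_pos (List.mem_cons_self ..)]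
          simp [colNonEmpty]
        · have hne : (Int.ofNat j) ≠ (Int.ofNat i) := fun h => hji (Int.ofNat.inj h)
          rw [if_neg hne, PySem.Dict.getD_insert, if_neg hne,
            if_neg (by simp [hji, hj] : ¬ j ∈ i :: rest)]

-- filter by a conjunction = two successive filters
lemma filter_and (p q : Nat → Bool) (l : List Nat) :
    l.filter (fun a => p a && q a) = (l.filter p).filter q := by
  rw [List.filter_filter]; exact List.filter_congr (fun a _ => Bool.and_comm _ _)

-- B side: the row loop of one table is a filter by "empty in every row of the table"
lemma pruneRowsE_eq (t : List (List String)) :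
    ∀ (cands : List Nat),
      (pruneRowsE cands t).getD []
        = cands.filter (fun idx => t.all (fun row => row.getD idx "" == "")) := by
  induction t with
  | nil => intro cands; simp [pruneRowsE]
  | cons row rest ih =>
      intro cands
      show (let c := cands.filter (fun idx => row.getD idx "" == "");
            if c.isEmpty then none else pruneRowsE c rest).getD []
          = _
      simp only [List.all_cons]
      rw [filter_and (fun i => row.getD i "" == "")
          (fun i => rest.all (fun r => r.getD i "" == "")) cands]
      by_cases h : (cands.filter (fun idx => row.getD idx "" == "")).isEmpty
      · rw [if_pos h, List.isEmpty_iff.mp h, List.filter_nil]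
        rfl
      · rw [if_neg h, ih]

-- B side: the whole sieve is a filter by "empty in every row of every table"
lemma pruneTables_eq (ts : List (List (List String))) :
    ∀ (cands : List Nat),
      pruneTables cands ts
        = cands.filter (fun idx => ts.all (fun t => t.all (fun row => row.getD idx "" == ""))) := by
  induction ts with
  | nil => intro cands; simp [pruneTables]
  | cons t rest ih =>
      intro cands
      have hrows := pruneRowsE_eq t cands
      show (match pruneRowsE cands t with
            | none => []
            | some c => pruneTables c rest) = _
      simp only [List.all_cons]
      rw [filter_and (fun i => t.all (fun row => row.getD i "" == ""))
          (fun i => rest.all (fun u => u.all (fun row => row.getD i "" == ""))) cands]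
      cases h : pruneRowsE cands t with
      | none =>
          rw [h, Option.getD_none] at hrows
          rw [← hrows, List.filter_nil]
      | some c =>
          rw [h, Option.getD_some] at hrows
          show pruneTables c rest = _
          rw [ih, hrows]

-- A's comprehension as a filter-then-map
lemma filterMap_if (b : Nat → Bool) (l : List Nat) :
    l.filterMap (fun j => if b j then none else some (Int.ofNat j))
      = (l.filter (fun j => !b j)).map Int.ofNat := by
  induction l with
  | nil => rfl
  | cons a rest ih =>
      rw [List.filterMap_cons, List.filter_cons]
      by_cases hb : b a = true
      · rw [if_pos hb, hb, ih]
        simp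
      · rw [if_neg hb, Bool.not_eq_true] at *
        rw [hb, ih]
        simp

-- the two column predicates agree
lemma notColNonEmpty (tables : List (List (List String))) (j : Nat) :
    (!colNonEmpty tables j)
      = tables.all (fun t => t.all (fun row => row.getD j "" == "")) := by
  simp [colNonEmpty, List.not_any_eq_all_not, bne]

-- ===== VERDICT (by name: the statement is the Claim_ definition above) =====
theorem index_empty_columns_py_spec : Claim_equal_index_empty_columns_py := by
  intro tables _ _
  unfold Spec_index_empty_columns_py index_empty_columns_py index_empty_columns_py_alt
  rw [pruneTables_eq]
  rw [show (List.range ((tables.headD []).headD []).length).filterMap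
        (fun (idx : Nat) => if ((List.range ((tables.headD []).headD []).length).foldl
            (fun m (idx : Nat) =>
              tables.foldl (fun m table =>
                m.insert (Int.ofNat idx)
                  (m.getD (Int.ofNat idx) false || table.any (fun row => row.getD idx "" != "")))
                (m.insert (Int.ofNat idx) false)) PySem.Dict.empty).getD (Int.ofNat idx) false
          then none else some (Int.ofNat idx))
      = (List.range ((tables.headD []).headD []).length).filterMap
          (fun (idx : Nat) => if colNonEmpty tables idx then none else some (Int.ofNat idx))
    from List.filterMap_congr (fun j hj => by
      rw [dictA_outer tables (List.range _) PySem.Dict.empty j, if_pos hj])]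
  rw [filterMap_if]
  congr 1
  exact List.filter_congr (fun j _ => notColNonEmpty tables j)
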